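-- pv_equiv track=rewrite | github.com/leehyeonjin99/-yhw991228- | beakjoon/삼성 SW 역량 테스트 기출 문제/모노미노도미노2.py | downing
-- ===== SOURCE A (Python) =====
-- def downing(board):
--     board_tmp = [tmp.copy() for tmp in board]
--     for row in range(len(board_tmp))[::-1]:
--         if 1 not in board_tmp[row]:
--             continue
--         next_cnt = 1
--         while row + next_cnt < len(board_tmp) and 1 not in board_tmp[row + next_cnt]:
--             next_cnt += 1
--         if next_cnt == 1:
--             continue
--         board_tmp[row], board_tmp[row + next_cnt - 1] = board_tmp[row + next_cnt - 1], board_tmp[row]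
--     return board_tmp
-- ===== SOURCE B (Python) =====
-- def downing(board):
--     n = len(board)
--     out = [row.copy() for row in board]
--     filled = [1 in row for row in board]
--     t = n - 1
--     for p in range(n - 1, -1, -1):
--         if filled[p]:
--             if t != p:
--                 out[p], out[t] = out[t], out[p]
--             t -= 1
--     return out
-- ===== Notes on version B (the rewrite author's own statement) =====
-- stated objective: faster
-- what changed: B precomputes the row-filled flags once and replaces A's inner while-scan over the gap (re-scanning rows for membership on each outer step) with a single write-pointer t that tracks the landing position arithmetically, performing the same swaps in one pass.
import Mathlib
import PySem

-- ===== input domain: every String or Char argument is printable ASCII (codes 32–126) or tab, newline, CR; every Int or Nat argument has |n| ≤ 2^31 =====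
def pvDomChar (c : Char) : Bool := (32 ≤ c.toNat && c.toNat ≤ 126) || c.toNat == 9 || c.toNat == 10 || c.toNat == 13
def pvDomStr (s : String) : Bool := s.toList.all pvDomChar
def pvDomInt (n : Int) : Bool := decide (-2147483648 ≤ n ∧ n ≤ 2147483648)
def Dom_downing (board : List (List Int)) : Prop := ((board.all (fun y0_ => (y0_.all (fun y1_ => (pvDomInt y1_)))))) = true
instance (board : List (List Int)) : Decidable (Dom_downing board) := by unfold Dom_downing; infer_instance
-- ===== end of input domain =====

-- B is faster: it computes each row's filled flag once and tracks the landing row with a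
-- write pointer, replacing A's repeated membership re-scans of the gap below each filled row.
-- ===== PORT A =====
-- the `while row + next_cnt < len(...) and 1 not in ...: next_cnt += 1` loop
def downWhile (st : List (List Int)) (row : Nat) (c : Nat) : Nat :=
  if h : row + c < st.length ∧ (1 : Int) ∉ st.getD (row + c) [] then
    downWhile st row (c + 1)
  else c
termination_by st.length - (row + c)

-- one iteration of A's `for row in range(len(board_tmp))[::-1]` body
def downBody (st : List (List Int)) (row : Nat) : List (List Int) :=
  if (1 : Int) ∈ st.getD row [] then
    let nc := downWhile st row 1
    if nc = 1 then st
    else (st.set row (st.getD (row + nc - 1) [])).set (row + nc - 1) (st.getD row [])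
  else st

-- A's reversed loop: processes rows k-1, k-2, …, 0
def downLoop (st : List (List Int)) (k : Nat) : List (List Int) :=
  match k with
  | 0 => st
  | k + 1 => downLoop (downBody st k) k

def downing (board : List (List Int)) : List (List Int) :=
  downLoop board board.length

-- ===== PORT B =====
def swapRows (st : List (List Int)) (i j : Nat) : List (List Int) :=
  (st.set i (st.getD j [])).set j (st.getD i [])

-- B's single pass: p runs k-1, …, 0; t is the write pointer for the next filled row
def downAltLoop (st : List (List Int)) (filled : List Bool) (t : Int) (k : Nat) :
    List (List Int) :=
  match k with
  | 0 => st
  | k + 1 =>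
    if filled.getD k false then
      downAltLoop (if t ≠ (k : Int) then swapRows st k t.toNat else st) filled (t - 1) k
    else downAltLoop st filled t k

def downing_alt (board : List (List Int)) : List (List Int) :=
  downAltLoop board (board.map (fun r => decide ((1 : Int) ∈ r)))
    ((board.length : Int) - 1) board.length

-- ===== PRECONDITION & SPEC =====
def Spec_downing (board : List (List Int)) (out : List (List Int)) : Prop := out = downing_alt board
instance (board : List (List Int)) (out : List (List Int)) : Decidable (Spec_downing board out) := by unfold Spec_downing; infer_instance

-- ===== CLAIM (what is proved, stated in full; the proofs are below) =====
def Claim_equal_downing : Prop := ∀ (board : List (List Int)), Dom_downing board → Spec_downing board (downing board)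

-- ===== LEMMAS AND PROOFS =====

-- number of rows with index in [k, board.length) that contain a 1
def fcnt (board : List (List Int)) (k : Nat) : Nat :=
  ((board.drop k).filter (fun r => decide ((1 : Int) ∈ r))).length

theorem fcnt_le (board : List (List Int)) (k : Nat) :
    fcnt board k ≤ board.length - k := by
  have h := List.length_filter_le (fun r => decide ((1 : Int) ∈ r)) (board.drop k)
  simpa [fcnt, List.length_drop] using h

theorem fcnt_succ (board : List (List Int)) (k : Nat) (hk : k < board.length) :
    fcnt board k = (if (1 : Int) ∈ board.getD k [] then 1 else 0) + fcnt board (k + 1) := by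
  unfold fcnt
  rw [List.drop_eq_getElem_cons hk, List.filter_cons]
  rw [List.getD_eq_getElem board [] hk]
  by_cases h : (1 : Int) ∈ board[k] <;> simp [h, Nat.add_comm]

theorem getD_prefix (st board : List (List Int)) (m j : Nat)
    (hpre : st.take m = board.take m) (hj : j < m) :
    st.getD j [] = board.getD j [] := by
  have h1 : (st.take m)[j]? = st[j]? := by simp [hj]
  have h2 : (board.take m)[j]? = board[j]? := by simp [hj]
  rw [List.getD_eq_getElem?_getD, List.getD_eq_getElem?_getD, ← h1, ← h2, hpre]

theorem take_mono (st board : List (List Int)) (m : Nat)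
    (hpre : st.take (m + 1) = board.take (m + 1)) :
    st.take m = board.take m := by
  have := congrArg (List.take m) hpre
  simpa [List.take_take, Nat.min_def, Nat.le_succ] using this

theorem downWhile_spec (st : List (List Int)) (k T : Nat)
    (hT : T < st.length)
    (hgap : ∀ i : Nat, k < i → i ≤ T → (1 : Int) ∉ st.getD i [])
    (hstop : T + 1 < st.length → (1 : Int) ∈ st.getD (T + 1) []) :
    ∀ d c : Nat, 1 ≤ c → k + c + d = T + 1 → downWhile st k c = T + 1 - k := by
  intro d
  induction d with
  | zero =>
    intro c hc hsum
    rw [downWhile]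
    rw [dif_neg]
    · omega
    · intro ⟨h1, h2⟩
      have hce : k + c = T + 1 := by omega
      rw [hce] at h2
      exact h2 (hstop (by omega))
  | succ d ih =>
    intro c hc hsum
    rw [downWhile]
    rw [dif_pos]
    · exact ih (c + 1) (by omega) (by omega)
    · constructor
      · omega
      · exact hgap (k + c) (by omega) (by omega)

theorem loop_eq (board : List (List Int)) :
    ∀ (k : Nat) (st : List (List Int)) (t : Int),
      st.length = board.length →
      k ≤ board.length →
      st.take k = board.take k →
      t = (board.length : Int) - 1 - fcnt board k →
      (∀ i : Nat, k ≤ i → (i : Int) ≤ t → (1 : Int) ∉ st.getD i []) →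
      (∀ i : Nat, t < (i : Int) → i < board.length → (1 : Int) ∈ st.getD i []) →
      downLoop st k =
        downAltLoop st (board.map (fun r => decide ((1 : Int) ∈ r))) t k := by
  intro k
  induction k with
  | zero => intro st t _ _ _ _ _ _; rfl
  | succ k ih =>
    intro st t hlen hk hpre ht hgap hbelow
    have hkn : k < board.length := by omega
    have hstk : st.getD k [] = board.getD k [] := getD_prefix st board (k + 1) k hpre (by omega)
    have hfget : (board.map (fun r => decide ((1 : Int) ∈ r))).getD k false =
        decide ((1 : Int) ∈ board.getD k []) := by
      rw [List.getD_eq_getElem?_getD, List.getElem?_map,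
        List.getElem?_eq_getElem hkn, List.getD_eq_getElem board [] hkn]
      rfl
    simp only [downLoop, downAltLoop]
    by_cases hf : (1 : Int) ∈ board.getD k []
    · -- filled row k
      have hfst : (1 : Int) ∈ st.getD k [] := by rw [hstk]; exact hf
      have hfT : ((board.map (fun r => decide ((1 : Int) ∈ r))).getD k false = true) := by
        rw [hfget]; exact decide_eq_true hf
      rw [if_pos hfT]
      have hF := fcnt_le board (k + 1)
      have hfc : fcnt board k = 1 + fcnt board (k + 1) := by
        rw [fcnt_succ board k hkn, if_pos hf]
      have htk : (k : Int) ≤ t := by omega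
      have htn : t < (board.length : Int) := by omega
      set T : Nat := t.toNat with hTdef
      have hTt : (T : Int) = t := Int.toNat_of_nonneg (by omega)
      have hTlt : T < st.length := by omega
      have hkT : k ≤ T := by omega
      have hnc : downWhile st k 1 = T + 1 - k := by
        refine downWhile_spec st k T hTlt ?_ ?_ (T - k) 1 (by omega) (by omega)
        · intro i h1 h2
          exact hgap i (by omega) (by omega)
        · intro h
          exact hbelow (T + 1) (by omega) (by omega)
      by_cases hTk : T = k
      · -- lands in place: next_cnt = 1, no swap
        have hA : downBody st k = st := by
          simp only [downBody, hnc]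
          rw [if_pos hfst, if_pos (by omega : T + 1 - k = 1)]
        rw [hA, if_neg (by omega : ¬ t ≠ (k : Int))]
        refine ih st (t - 1) hlen (by omega) (take_mono st board k hpre) (by omega) ?_ ?_
        · intro i h1 h2; omega
        · intro i h1 h2
          by_cases hik : i = k
          · subst hik; exact hfst
          · exact hbelow i (by omega) h2
      · -- actual swap of rows k and T
        have hkT' : k < T := by omega
        have hA : downBody st k =
            (st.set k (st.getD T [])).set T (st.getD k []) := by
          simp only [downBody, hnc]
          rw [if_pos hfst, if_neg (by omega : ¬ T + 1 - k = 1),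
            (by omega : k + (T + 1 - k) - 1 = T)]
        have hB : (if t ≠ (k : Int) then swapRows st k t.toNat else st) =
            (st.set k (st.getD T [])).set T (st.getD k []) := by
          rw [if_pos (by omega : t ≠ (k : Int))]
          unfold swapRows
          rw [← hTdef]
        rw [hA, hB]
        set st' := (st.set k (st.getD T [])).set T (st.getD k []) with hst'
        have hlen' : st'.length = board.length := by simp [hst', hlen]
        have hget' : ∀ j : Nat, j < st.length →
            st'.getD j [] = if j = T then st.getD k []
              else if j = k then st.getD T [] else st.getD j [] := by
          intro j hj
          rw [hst', List.getD_eq_getElem?_getD]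
          by_cases hjT : j = T
          · subst hjT
            rw [List.getElem?_set_self (by simpa using hTlt)]
            simp
          · rw [List.getElem?_set_ne (by omega)]
            by_cases hjk : j = k
            · subst hjk
              rw [List.getElem?_set_self (by omega)]
              simp [hjT]
            · rw [List.getElem?_set_ne (by omega)]
              simp [hjT, hjk, List.getD_eq_getElem?_getD]
        refine ih st' (t - 1) hlen' (by omega) ?_ (by omega) ?_ ?_
        · have e1 : (st.take k).set k (st.getD T []) = st.take k :=
            List.set_eq_of_length_le (by rw [List.length_take]; omega)
          have e2 : (st.take k).set T (st.getD k []) = st.take k :=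
            List.set_eq_of_length_le (by rw [List.length_take]; omega)
          rw [hst', List.take_set, List.take_set, e1, e2]
          exact take_mono st board k hpre
        · intro i h1 h2
          rw [hget' i (by omega)]
          rw [if_neg (by omega : ¬ i = T)]
          by_cases hik : i = k
          · rw [if_pos hik]
            exact hgap T (by omega) (by omega)
          · rw [if_neg hik]
            exact hgap i (by omega) (by omega)
        · intro i h1 h2
          rw [hget' i (by omega)]
          by_cases hiT : i = T
          · rw [if_pos hiT]; exact hfst
          · rw [if_neg hiT, if_neg (by omega : ¬ i = k)]
            exact hbelow i (by omega) h2
    · -- row k has no 1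
      have hfc : fcnt board k = fcnt board (k + 1) := by
        rw [fcnt_succ board k hkn, if_neg hf]; omega
      have hfF : ¬ ((board.map (fun r => decide ((1 : Int) ∈ r))).getD k false = true) := by
        rw [hfget]; simp only [decide_eq_true_eq]; exact hf
      have hA : downBody st k = st := by
        simp only [downBody]
        rw [if_neg (by rw [hstk]; exact hf)]
      rw [hA, if_neg hfF]
      refine ih st t hlen (by omega) (take_mono st board k hpre) (by omega) ?_ hbelow
      intro i h1 h2
      by_cases hik : i = k
      · subst hik; rw [hstk]; exact hf
      · exact hgap i (by omega) h2

-- ===== VERDICT (by name: the statement is the Claim_ definition above) =====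
theorem downing_spec : Claim_equal_downing := by
  intro board _
  show downing board = downing_alt board
  unfold downing downing_alt
  refine loop_eq board board.length board ((board.length : Int) - 1) rfl le_rfl rfl ?_ ?_ ?_
  · simp [fcnt]
  · intro i h1 h2; omega
  · intro i h1 h2; omega
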